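-- pv_equiv track=rewrite | github.com/as6325400/KohakuTerrarium | src/kohakuterrarium/parsing/state_machine.py | _parse_block_content
-- ===== SOURCE A (Python) =====
-- def _parse_block_content(content: str) -> tuple[dict[str, str], str]:
--     """
--     Parse block content into args and body.
--
--     Args start with @@ on their own line.
--     Everything else is body.
--
--     Returns:
--         (args_dict, body_string)
--     """
--     args: dict[str, str] = {}
--     body_lines: list[str] = []
--     in_args = True
--
--     for line in content.split("\n"):
--         # Skip empty lines while still in args section
--         if in_args and line.strip() == "":
--             continue
--         if in_args and line.startswith("@@"):
--             # Parse arg: @@key=value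
--             arg_content = line[2:]  # Remove @@
--             if "=" in arg_content:
--                 key, value = arg_content.split("=", 1)
--                 args[key.strip()] = value.strip()
--             else:
--                 # Arg without value
--                 args[arg_content.strip()] = ""
--         else:
--             # Once we hit a non-arg line, everything is body
--             in_args = False
--             body_lines.append(line)
--
--     body = "\n".join(body_lines).strip()
--     return args, body
-- ===== SOURCE B (Python) =====
-- def _parse_block_content(content: str) -> tuple[dict[str, str], str]:
--     """Two-phase version: locate the args/body boundary first, then parse each slice."""
--     lines = content.split("\n")
--     # Boundary: first line that is neither blank nor an @@ arg line.
--     i = 0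
--     while i < len(lines) and (lines[i].strip() == "" or lines[i].startswith("@@")):
--         i += 1
--     args: dict[str, str] = {}
--     for line in lines[:i]:
--         if line.strip():
--             arg_content = line[2:]
--             if "=" in arg_content:
--                 key, value = arg_content.split("=", 1)
--                 args[key.strip()] = value.strip()
--             else:
--                 args[arg_content.strip()] = ""
--     return args, "\n".join(lines[i:]).strip()
-- ===== Notes on version B (the rewrite author's own statement) =====
-- stated objective: simpler
-- what changed: Replaces the single stateful pass with an in_args flag by a two-phase decomposition: first find the boundary index (first non-blank, non-@@ line), then parse lines before it as args and join the rest as body; the flag disappears.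
import Mathlib
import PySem

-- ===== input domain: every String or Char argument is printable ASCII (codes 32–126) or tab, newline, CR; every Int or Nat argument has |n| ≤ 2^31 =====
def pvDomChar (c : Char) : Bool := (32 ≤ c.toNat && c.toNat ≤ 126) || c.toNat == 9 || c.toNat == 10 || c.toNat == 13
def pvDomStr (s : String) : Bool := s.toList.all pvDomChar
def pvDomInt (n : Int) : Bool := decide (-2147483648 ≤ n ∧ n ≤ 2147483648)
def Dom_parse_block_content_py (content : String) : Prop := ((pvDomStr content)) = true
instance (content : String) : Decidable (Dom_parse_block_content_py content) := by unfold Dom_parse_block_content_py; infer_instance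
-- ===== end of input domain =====

-- B changes the decomposition only: a boundary index plus two slice passes replaces A's
-- single stateful pass with an in_args flag; same cost, simpler control flow.

-- ===== PORT A =====
-- Shared by both ports: the '@@key=value' parse both Python versions contain verbatim.
-- split("=", 1) with "=" present yields exactly [key, value]; the getD/headD defaults are unreachable.
def pvParseArg (args : PySem.Dict String String) (line : String) : PySem.Dict String String :=
  let arg_content := PySem.Str.slice line (some 2) none
  if PySem.Str.isIn "=" arg_content then
    let parts := (PySem.Str.splitMax? arg_content "=" 1).getD []
    args.insert (PySem.Str.strip (parts.headD "")) (PySem.Str.strip ((parts.drop 1).headD ""))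
  else
    args.insert (PySem.Str.strip arg_content) ""

-- One iteration of A's loop over (in_args, args, body_lines).
def pvStepA (st : Bool × PySem.Dict String String × List String) (line : String) :
    Bool × PySem.Dict String String × List String :=
  if st.1 && (PySem.Str.strip line == "") then st
  else if st.1 && PySem.Str.startswith line "@@" then (st.1, pvParseArg st.2.1 line, st.2.2)
  else (false, st.2.1, st.2.2 ++ [line])

def parse_block_content_py (content : String) : (List (String × String)) × String :=
  let lines := (PySem.Str.split? content "\n").getD []   -- sep "\n" ≠ "", so split? is always some
  let st := lines.foldl pvStepA (true, PySem.Dict.empty, [])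
  (st.2.1.items, PySem.Str.strip (PySem.Str.join "\n" st.2.2))

-- ===== PORT B =====
-- B's while-loop condition: a line before the boundary (blank or an @@ line).
def pvIsPre (line : String) : Bool :=
  PySem.Str.strip line == "" || PySem.Str.startswith line "@@"

-- Source B's 'while i < len(lines) and pvIsPre(lines[i]): i += 1' as structural recursion.
def pvBoundary : List String → Nat
  | [] => 0
  | l :: ls => if pvIsPre l then pvBoundary ls + 1 else 0

-- One iteration of Source B's args loop: skip blanks, parse the rest.
def pvArgStep (args : PySem.Dict String String) (line : String) : PySem.Dict String String :=
  if PySem.Str.strip line == "" then args else pvParseArg args line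

def parse_block_content_py_alt (content : String) : (List (String × String)) × String :=
  let lines := (PySem.Str.split? content "\n").getD []
  let i := pvBoundary lines
  let args := (lines.take i).foldl pvArgStep PySem.Dict.empty
  (args.items, PySem.Str.strip (PySem.Str.join "\n" (lines.drop i)))

-- ===== PRECONDITION & SPEC =====
def Spec_parse_block_content_py (content : String) (out : (List (String × String)) × String) : Prop := out = parse_block_content_py_alt content
instance (content : String) (out : (List (String × String)) × String) : Decidable (Spec_parse_block_content_py content out) := by unfold Spec_parse_block_content_py; infer_instance

-- ===== CLAIM (what is proved, stated in full; the proofs are below) =====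
def Claim_equal_parse_block_content_py : Prop := ∀ (content : String), Dom_parse_block_content_py content → Spec_parse_block_content_py content (parse_block_content_py content)

-- ===== LEMMAS AND PROOFS =====

-- Once A's flag is false, the loop only appends to body_lines.
theorem pv_false_phase (lines : List String) (d : PySem.Dict String String) (b : List String) :
    lines.foldl pvStepA (false, d, b) = (false, d, b ++ lines) := by
  induction lines generalizing b with
  | nil => simp
  | cons l ls ih =>
    simp only [List.foldl_cons, pvStepA, Bool.false_and, Bool.false_eq_true, if_false]
    rw [ih]
    simp

-- A's loop from the initial state, characterised by the boundary split.
theorem pv_true_phase (lines : List String) (d : PySem.Dict String String) :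
    lines.foldl pvStepA (true, d, []) =
      (lines.all pvIsPre, (lines.takeWhile pvIsPre).foldl pvArgStep d, lines.dropWhile pvIsPre) := by
  induction lines generalizing d with
  | nil => simp
  | cons l ls ih =>
    by_cases hp : pvIsPre l = true
    · have hstep : pvStepA (true, d, []) l = (true, pvArgStep d l, []) := by
        by_cases hb : (PySem.Str.strip l == "") = true
        · simp [pvStepA, pvArgStep, hb]
        · have h2 : PySem.Str.startswith l "@@" = true := by
            unfold pvIsPre at hp
            simpa [hb] using hp
          have h2' : PySem.Chars.startswith l.toList ['@', '@'] = true := by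
            simpa using h2
          simp [pvStepA, pvArgStep, hb, h2']
      rw [List.foldl_cons, hstep, ih]
      simp [hp]
    · have hb : (PySem.Str.strip l == "") = false := by
        unfold pvIsPre at hp
        simp only [Bool.or_eq_true, not_or, Bool.not_eq_true] at hp
        exact hp.1
      have h2 : PySem.Str.startswith l "@@" = false := by
        unfold pvIsPre at hp
        simp only [Bool.or_eq_true, not_or, Bool.not_eq_true] at hp
        exact hp.2
      rw [List.foldl_cons]
      have h2' : PySem.Chars.startswith l.toList ['@', '@'] = false := by
        simpa using h2
      have hstep : pvStepA (true, d, []) l = (false, d, [l]) := by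
        simp [pvStepA, hb, h2']
      rw [hstep, pv_false_phase]
      simp [hp]

theorem pv_take_boundary (lines : List String) :
    lines.take (pvBoundary lines) = lines.takeWhile pvIsPre := by
  induction lines with
  | nil => simp
  | cons l ls ih =>
    by_cases hp : pvIsPre l = true
    · simp [pvBoundary, hp, ih]
    · simp [pvBoundary, hp]

theorem pv_drop_boundary (lines : List String) :
    lines.drop (pvBoundary lines) = lines.dropWhile pvIsPre := by
  induction lines with
  | nil => simp
  | cons l ls ih =>
    by_cases hp : pvIsPre l = true
    · simp [pvBoundary, hp, ih]
    · simp [pvBoundary, hp]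

-- ===== VERDICT (by name: the statement is the Claim_ definition above) =====
theorem parse_block_content_py_spec : Claim_equal_parse_block_content_py := by
  intro content _
  unfold Spec_parse_block_content_py parse_block_content_py parse_block_content_py_alt
  simp only [pv_true_phase, pv_take_boundary, pv_drop_boundary]
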